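-- pv_equiv track=rewrite | github.com/blzzua/codewars | 6-kyu/alphabet_war_airstrike_letters_massacre.py | alphabet_war
-- ===== SOURCE A (Python) =====
-- def alphabet_war(fight):
--     force = { 'w': 4, 'p': 3, 'b': 2, 's': 1, 'm': -4, 'q': -3, 'd': -2, 'z': -1}
--     l = list(' ' + fight + ' ')
--     for i,ch in enumerate(l):
--         if ch == '*':
--             l[i-1] = '_'
--             l[i] = '_'
--             l[i+1] = '_' if l[i+1] != '*' else '*'
--     result = sum(force.get(ch,0) for ch in l)
--     if result > 0:
--         return "Left side wins!"
--     elif result < 0: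
--         return "Right side wins!"
--     elif result == 0:
--         return "Let's fight again!"
-- ===== SOURCE B (Python) =====
-- def alphabet_war(fight):
--     force = {'w': 4, 'p': 3, 'b': 2, 's': 1, 'm': -4, 'q': -3, 'd': -2, 'z': -1}
--     n = len(fight)
--     total = sum(force.get(c, 0) for i, c in enumerate(fight)
--                 if c != '*'
--                 and (i == 0 or fight[i - 1] != '*')
--                 and (i == n - 1 or fight[i + 1] != '*'))
--     if total > 0:
--         return "Left side wins!"
--     if total < 0:
--         return "Right side wins!"
--     return "Let's fight again!"
-- ===== Notes on version B (the rewrite author's own statement) =====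
-- stated objective: simpler
-- what changed: B drops A's padded mutable list and in-place blast marking: it sums the force table in one comprehension over the characters that survive, a character surviving iff neither it nor an adjacent character is a bomb.
import Mathlib
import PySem

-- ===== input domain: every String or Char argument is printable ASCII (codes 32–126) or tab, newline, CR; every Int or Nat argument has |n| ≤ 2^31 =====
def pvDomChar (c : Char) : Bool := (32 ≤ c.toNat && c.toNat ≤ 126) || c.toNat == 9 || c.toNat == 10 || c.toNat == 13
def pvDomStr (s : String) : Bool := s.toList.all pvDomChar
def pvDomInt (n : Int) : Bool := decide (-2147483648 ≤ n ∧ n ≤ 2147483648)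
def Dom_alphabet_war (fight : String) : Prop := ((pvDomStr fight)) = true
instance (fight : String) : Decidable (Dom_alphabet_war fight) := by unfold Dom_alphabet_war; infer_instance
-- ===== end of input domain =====

-- B replaces A's padded mutable list and in-place blast marking by a single
-- comprehension summing the force of the characters not adjacent to a bomb (objective: simpler).


-- ===== PORT A =====
def pvForceA : PySem.Dict Char Int :=
  PySem.Dict.ofList [('w', 4), ('p', 3), ('b', 2), ('s', 1), ('m', -4), ('q', -3), ('d', -2), ('z', -1)]

-- One iteration of A's `for i, ch in enumerate(l)` body (it reads the LIVE list, as Python does).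
-- Exactness: the padded list starts and ends with ' ' and the writes only produce '_' or keep an
-- existing '*', so the branch fires only when 1 ≤ i and i + 1 < l.length; there Python's
-- l[i-1] / l[i+1] accesses and assignments coincide with Nat subtraction, List.getD and List.set.
def pvWarStep (l : List Char) (i : Nat) : List Char :=
  if l.getD i ' ' = '*' then
    ((l.set (i - 1) '_').set i '_').set (i + 1)
      (if ((l.set (i - 1) '_').set i '_').getD (i + 1) ' ' = '*' then '*' else '_')
  else l

def alphabet_war (fight : String) : String :=
  let l0 : List Char := (' ' :: fight.toList) ++ [' ']
  let l := (List.range l0.length).foldl pvWarStep l0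
  let result : Int := l.foldl (fun s ch => s + pvForceA.getD ch 0) 0
  if result > 0 then "Left side wins!"
  else if result < 0 then "Right side wins!"
  else "Let's fight again!"

-- ===== PORT B =====
-- Source B's local `force` dict is the same literal table as A's; pvForceA is reused for it.
-- Python B's guarded indexing fight[i-1] / fight[i+1] is only reached with 1 ≤ i resp. i < n - 1
-- (short-circuit), where pyGetD is exact.
def alphabet_war_alt (fight : String) : String :=
  let cs : List Char := fight.toList
  let n : Int := cs.length
  let total : Int := (PySem.List.enumerate cs).foldl (fun s ic =>
    if ic.2 ≠ '*' ∧ (ic.1 = 0 ∨ PySem.List.pyGetD cs (ic.1 - 1) ' ' ≠ '*')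
        ∧ (ic.1 = n - 1 ∨ PySem.List.pyGetD cs (ic.1 + 1) ' ' ≠ '*')
    then s + pvForceA.getD ic.2 0 else s) 0
  if total > 0 then "Left side wins!"
  else if total < 0 then "Right side wins!"
  else "Let's fight again!"

-- ===== PRECONDITION & SPEC =====
def Spec_alphabet_war (fight : String) (out : String) : Prop := out = alphabet_war_alt fight
instance (fight : String) (out : String) : Decidable (Spec_alphabet_war fight out) := by unfold Spec_alphabet_war; infer_instance

-- ===== CLAIM (what is proved, stated in full; the proofs are below) =====
def Claim_equal_alphabet_war : Prop := ∀ (fight : String), Dom_alphabet_war fight → Spec_alphabet_war fight (alphabet_war fight)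

-- ===== LEMMAS AND PROOFS =====

-- The state of A's list after the first k loop iterations, as a pure function of position.
def pvModel (l0 : List Char) (k j : Nat) : Char :=
  if l0.getD j ' ' = '*' then (if j < k then '_' else '*')
  else if (1 ≤ j ∧ l0.getD (j - 1) ' ' = '*' ∧ j ≤ k) ∨ (l0.getD (j + 1) ' ' = '*' ∧ j + 1 < k)
  then '_' else l0.getD j ' '

lemma pvMget (l0 : List Char) (k' j : Nat) (hj : j < l0.length) :
    ((List.range l0.length).map (pvModel l0 k')).getD j ' ' = pvModel l0 k' j :=
  PySem.List.getD_map_range _ _ _ _ hj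

lemma pvGetD_set_ne (l : List Char) (m j : Nat) (v d : Char) (h : m ≠ j) :
    (l.set m v).getD j d = l.getD j d := by
  simp [List.getD_eq_getElem?_getD, h]

lemma pvStep_model (l0 : List Char) (h0 : l0.getD 0 ' ' ≠ '*')
    (hlast : l0.getD (l0.length - 1) ' ' ≠ '*') (k : Nat) (hk : k < l0.length) :
    pvWarStep ((List.range l0.length).map (pvModel l0 k)) k
      = (List.range l0.length).map (pvModel l0 (k + 1)) := by
  by_cases hc : l0.getD k ' ' = '*'
  · have hk1 : 1 ≤ k := by
      rcases Nat.eq_zero_or_pos k with h | h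
      · exact absurd (h ▸ hc) h0
      · exact h
    have hk2 : k + 1 < l0.length := by
      rcases Nat.lt_or_ge (k + 1) l0.length with h | h
      · exact h
      · have hke : k = l0.length - 1 := by omega
        exact absurd (hke ▸ hc) hlast
    have hself : pvModel l0 k k = '*' := by
      simp only [pvModel]
      rw [if_pos hc, if_neg (Nat.lt_irrefl k)]
    have h1 : pvModel l0 k (k + 1) = l0.getD (k + 1) ' ' := by
      simp only [pvModel]
      by_cases hx : l0.getD (k + 1) ' ' = '*'
      · rw [if_pos hx, if_neg (by omega), hx]
      · rw [if_neg hx, if_neg (by rintro (⟨-, -, h⟩ | ⟨-, h⟩) <;> omega)]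
    unfold pvWarStep
    rw [pvMget l0 k k hk, hself, if_pos rfl,
      pvGetD_set_ne _ _ _ _ _ (by omega), pvGetD_set_ne _ _ _ _ _ (by omega),
      pvMget l0 k (k + 1) hk2, h1]
    apply List.ext_getElem
    · simp
    · intro j hj1 hj2
      have hjN : j < l0.length := by simpa using hj2
      simp only [List.getElem_set, List.getElem_map, List.getElem_range]
      by_cases hja : k + 1 = j
      · subst hja
        rw [if_pos rfl]
        simp only [pvModel]
        by_cases hcj : l0.getD (k + 1) ' ' = '*'
        · rw [if_pos hcj, hcj, if_pos rfl, if_neg (by omega)]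
        · rw [if_neg hcj, if_neg hcj, if_pos (Or.inl ⟨by omega, by rwa [Nat.add_sub_cancel], by omega⟩)]
      · rw [if_neg hja]
        by_cases hjb : k = j
        · subst hjb
          rw [if_pos rfl]
          simp only [pvModel]
          rw [if_pos hc, if_pos (by omega)]
        · rw [if_neg hjb]
          by_cases hjc : k - 1 = j
          · rw [if_pos hjc]
            simp only [pvModel]
            by_cases hcj : l0.getD j ' ' = '*'
            · rw [if_pos hcj, if_pos (by omega)]
            · rw [if_neg hcj,
                if_pos (Or.inr ⟨by rw [show j + 1 = k by omega]; exact hc, by omega⟩)]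
          · rw [if_neg hjc]
            simp only [pvModel]
            by_cases hcj : l0.getD j ' ' = '*'
            · rw [if_pos hcj, if_pos hcj]
              exact if_congr (by omega) rfl rfl
            · rw [if_neg hcj, if_neg hcj]
              refine if_congr ?_ rfl rfl
              constructor
              · rintro (⟨a, b, c⟩ | ⟨a, b⟩)
                · exact Or.inl ⟨a, b, by omega⟩
                · exact Or.inr ⟨a, by omega⟩
              · rintro (⟨a, b, c⟩ | ⟨a, b⟩)
                · exact Or.inl ⟨a, b, by omega⟩
                · exact Or.inr ⟨a, by omega⟩
  · have hself : pvModel l0 k k ≠ '*' := by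
      simp only [pvModel]
      rw [if_neg hc]
      split
      · decide
      · exact hc
    unfold pvWarStep
    rw [pvMget l0 k k hk, if_neg hself]
    apply List.ext_getElem
    · simp
    · intro j hj1 hj2
      have hjN : j < l0.length := by simpa using hj2
      simp only [List.getElem_map, List.getElem_range]
      simp only [pvModel]
      by_cases hcj : l0.getD j ' ' = '*'
      · rw [if_pos hcj, if_pos hcj]
        refine if_congr ?_ rfl rfl
        constructor
        · omega
        · intro h
          rcases Nat.lt_or_ge j k with h' | h'
          · exact h'
          · have hje : j = k := by omega
            exact absurd (hje ▸ hcj) hc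
      · rw [if_neg hcj, if_neg hcj]
        refine if_congr ?_ rfl rfl
        constructor
        · rintro (⟨a, b, c⟩ | ⟨a, b⟩)
          · exact Or.inl ⟨a, b, by omega⟩
          · exact Or.inr ⟨a, by omega⟩
        · rintro (⟨a, b, c⟩ | ⟨a, b⟩)
          · refine Or.inl ⟨a, b, ?_⟩
            rcases Nat.lt_or_ge j (k + 1) with h | h
            · omega
            · have hje : j = k + 1 := by omega
              subst hje
              exact absurd (by rwa [Nat.add_sub_cancel] at b) hc
          · refine Or.inr ⟨a, ?_⟩
            rcases Nat.lt_or_ge (j + 1) k with h | h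
            · omega
            · have hje : j + 1 = k := by omega
              exact absurd (hje ▸ a) hc

lemma pvLoop_model (l0 : List Char) (h0 : l0.getD 0 ' ' ≠ '*')
    (hlast : l0.getD (l0.length - 1) ' ' ≠ '*') :
    ∀ k, k ≤ l0.length →
      (List.range k).foldl pvWarStep l0 = (List.range l0.length).map (pvModel l0 k) := by
  intro k
  induction k with
  | zero =>
    intro _
    rw [List.range_zero, List.foldl_nil]
    apply List.ext_getElem
    · simp
    · intro j hj1 hj2
      simp only [List.getElem_map, List.getElem_range]
      have hm : pvModel l0 0 j = l0.getD j ' ' := by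
        simp only [pvModel]
        by_cases hx : l0.getD j ' ' = '*'
        · rw [if_pos hx, if_neg (by omega), hx]
        · rw [if_neg hx, if_neg (by rintro (⟨h1, -, h2⟩ | ⟨-, h⟩) <;> omega)]
      have hjN : j < l0.length := by simpa using hj2
      rw [hm, List.getD_eq_getElem _ _ hjN]
  | succ k ih =>
    intro hk
    rw [List.range_succ, List.foldl_append, ih (by omega), List.foldl_cons, List.foldl_nil,
      pvStep_model l0 h0 hlast k (by omega)]

lemma pvFoldl_add_range (f : Nat → Int) :
    ∀ (n : Nat) (a : Int),
      (List.range n).foldl (fun s j => s + f j) a = a + ∑ j ∈ Finset.range n, f j := by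
  intro n
  induction n with
  | zero => intro a; simp
  | succ n ih =>
    intro a
    rw [List.range_succ, List.foldl_append, List.foldl_cons, List.foldl_nil, ih,
      Finset.sum_range_succ]
    ring

lemma pvFoldl_ite_range (p : Nat → Prop) [DecidablePred p] (f : Nat → Int) :
    ∀ (n : Nat) (a : Int),
      (List.range n).foldl (fun s j => if p j then s + f j else s) a
        = a + ∑ j ∈ Finset.range n, (if p j then f j else 0) := by
  intro n
  induction n with
  | zero => intro a; simp
  | succ n ih =>
    intro a
    rw [List.range_succ, List.foldl_append, List.foldl_cons, List.foldl_nil, ih,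
      Finset.sum_range_succ]
    by_cases h : p n
    · rw [if_pos h, if_pos h]; ring
    · rw [if_neg h, if_neg h]; ring

lemma pvPad_getD (cs : List Char) (j : Nat) :
    ((' ' :: cs) ++ [' ']).getD (j + 1) ' ' = cs.getD j ' ' := by
  simp only [List.getD_eq_getElem?_getD, List.cons_append, List.getElem?_cons_succ]
  rcases Nat.lt_or_ge j cs.length with hj | hj
  · rw [List.getElem?_append_left hj]
  · rw [List.getElem?_append_right hj, List.getElem?_eq_none (l := cs) (by omega)]
    rcases Nat.eq_or_lt_of_le hj with h | h
    · rw [show j - cs.length = 0 by omega]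
      rfl
    · rw [List.getElem?_eq_none (by simp; omega)]

-- the padded list read at any position, in terms of the original characters
lemma pvPad_getD' (cs : List Char) (i : Nat) :
    ((' ' :: cs) ++ [' ']).getD i ' ' = if i = 0 then ' ' else cs.getD (i - 1) ' ' := by
  cases i with
  | zero => rfl
  | succ i => rw [pvPad_getD, if_neg i.succ_ne_zero, Nat.add_sub_cancel]

lemma pvG_dead : pvForceA.getD '_' 0 = 0 ∧ pvForceA.getD '*' 0 = 0 ∧ pvForceA.getD ' ' 0 = 0 := by
  decide

lemma pvG_if (P : Prop) [Decidable P] : pvForceA.getD (if P then '_' else ' ') 0 = 0 := by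
  split
  · exact pvG_dead.1
  · exact pvG_dead.2.2

-- per-position agreement of the two summands
lemma pvTerm_eq (cs : List Char) (j : Nat) (hj : j < cs.length) :
    pvForceA.getD (pvModel ((' ' :: cs) ++ [' ']) (cs.length + 2) (j + 1)) 0
      = (if PySem.List.pyGetD cs (j : Int) ' ' ≠ '*'
            ∧ ((j : Int) = 0 ∨ PySem.List.pyGetD cs ((j : Int) - 1) ' ' ≠ '*')
            ∧ ((j : Int) = (cs.length : Int) - 1 ∨ PySem.List.pyGetD cs ((j : Int) + 1) ' ' ≠ '*')
          then pvForceA.getD (PySem.List.pyGetD cs (j : Int) ' ') 0 else 0) := by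
  have e0 : PySem.List.pyGetD cs (j : Int) ' ' = cs.getD j ' ' := PySem.List.pyGetD_natCast cs j ' '
  have e1 : 1 ≤ j → PySem.List.pyGetD cs ((j : Int) - 1) ' ' = cs.getD (j - 1) ' ' := by
    intro h
    rw [show (j : Int) - 1 = ((j - 1 : Nat) : Int) by omega, PySem.List.pyGetD_natCast]
  have e2 : PySem.List.pyGetD cs ((j : Int) + 1) ' ' = cs.getD (j + 1) ' ' := by
    rw [show (j : Int) + 1 = ((j + 1 : Nat) : Int) by push_cast; ring, PySem.List.pyGetD_natCast]
  have e3 : j = cs.length - 1 → cs.getD (j + 1) ' ' = ' ' := fun h =>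
    List.getD_eq_default _ _ (by omega)
  -- B's guard, written over Nat indices
  have hB : (PySem.List.pyGetD cs (j : Int) ' ' ≠ '*'
        ∧ ((j : Int) = 0 ∨ PySem.List.pyGetD cs ((j : Int) - 1) ' ' ≠ '*')
        ∧ ((j : Int) = (cs.length : Int) - 1 ∨ PySem.List.pyGetD cs ((j : Int) + 1) ' ' ≠ '*'))
      ↔ (cs.getD j ' ' ≠ '*' ∧ ¬ (1 ≤ j ∧ cs.getD (j - 1) ' ' = '*') ∧ cs.getD (j + 1) ' ' ≠ '*') := by
    rw [e0]
    constructor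
    · rintro ⟨hs, hl, hr⟩
      refine ⟨hs, ?_, ?_⟩
      · rintro ⟨h1, h2⟩
        rcases hl with h0 | hne
        · omega
        · exact hne (by rw [e1 h1]; exact h2)
      · rcases hr with h0 | hne
        · rw [e3 (by omega)]; decide
        · rwa [e2] at hne
    · rintro ⟨hs, hnl, hnr⟩
      refine ⟨hs, ?_, Or.inr (by rwa [e2])⟩
      rcases Nat.eq_zero_or_pos j with h | h
      · exact Or.inl (by omega)
      · exact Or.inr (by rw [e1 h]; exact fun h2 => hnl ⟨h, h2⟩)
  rw [if_congr hB rfl rfl, e0]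
  -- now evaluate A's model at position j + 1
  simp only [pvModel, pvPad_getD', if_neg (Nat.succ_ne_zero j), Nat.add_sub_cancel,
    if_neg (Nat.succ_ne_zero (j + 1))]
  by_cases hstar : cs.getD j ' ' = '*'
  · rw [if_pos hstar, if_pos (by omega), if_neg (by rintro ⟨h, -, -⟩; exact h hstar)]
    exact pvG_dead.1
  · rw [if_neg hstar]
    by_cases hkl : 1 ≤ j ∧ cs.getD (j - 1) ' ' = '*'
    · have hpos : (1 ≤ j + 1 ∧ (if j = 0 then ' ' else cs.getD (j - 1) ' ') = '*' ∧ j + 1 ≤ cs.length + 2)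
          ∨ (cs.getD (j + 1) ' ' = '*' ∧ j + 1 + 1 < cs.length + 2) :=
        Or.inl ⟨by omega, by rw [if_neg (by omega)]; exact hkl.2, by omega⟩
      rw [if_pos hpos, if_neg (by rintro ⟨-, hnl, -⟩; exact hnl hkl)]
      exact pvG_dead.1
    · by_cases hkr : cs.getD (j + 1) ' ' = '*'
      · have hpos : (1 ≤ j + 1 ∧ (if j = 0 then ' ' else cs.getD (j - 1) ' ') = '*' ∧ j + 1 ≤ cs.length + 2)
            ∨ (cs.getD (j + 1) ' ' = '*' ∧ j + 1 + 1 < cs.length + 2) :=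
        Or.inr ⟨hkr, by omega⟩
        rw [if_pos hpos, if_neg (by rintro ⟨-, -, hnr⟩; exact hnr hkr)]
        exact pvG_dead.1
      · have hneg : ¬ ((1 ≤ j + 1 ∧ (if j = 0 then ' ' else cs.getD (j - 1) ' ') = '*' ∧ j + 1 ≤ cs.length + 2)
            ∨ (cs.getD (j + 1) ' ' = '*' ∧ j + 1 + 1 < cs.length + 2)) := by
          rintro (⟨-, h, -⟩ | ⟨h, -⟩)
          · rcases Nat.eq_zero_or_pos j with h0 | h0
            · rw [if_pos h0] at h
              exact absurd h (by decide)
            · rw [if_neg (by omega)] at h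
              exact hkl ⟨h0, h⟩
          · exact hkr h
        rw [if_neg hneg, if_pos ⟨hstar, hkl, hkr⟩]

-- A's total equals B's total
lemma pvTotal_eq (cs : List Char) :
    (((List.range ((' ' :: cs) ++ [' ']).length).foldl pvWarStep ((' ' :: cs) ++ [' '])).foldl
        (fun s ch => s + pvForceA.getD ch 0) 0)
      = (PySem.List.enumerate cs).foldl (fun s ic =>
          if ic.2 ≠ '*' ∧ (ic.1 = 0 ∨ PySem.List.pyGetD cs (ic.1 - 1) ' ' ≠ '*')
              ∧ (ic.1 = ((cs.length : Int)) - 1 ∨ PySem.List.pyGetD cs (ic.1 + 1) ' ' ≠ '*')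
          then s + pvForceA.getD ic.2 0 else s) 0 := by
  have hlen : ((' ' :: cs) ++ [' ']).length = cs.length + 2 := by simp
  have h0 : ((' ' :: cs) ++ [' ']).getD 0 ' ' = ' ' := rfl
  have hlast : ((' ' :: cs) ++ [' ']).getD (((' ' :: cs) ++ [' ']).length - 1) ' ' = ' ' := by
    rw [hlen, show cs.length + 2 - 1 = cs.length + 1 by omega, pvPad_getD,
      List.getD_eq_default _ _ (le_refl cs.length)]
  rw [pvLoop_model _ (by rw [h0]; decide) (by rw [hlast]; decide) _ le_rfl,
    List.foldl_map, pvFoldl_add_range, hlen]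
  rw [PySem.List.enumerate_eq_map_pyRange cs ' ',
    show PySem.List.len cs = ((cs.length : Nat) : Int) by simp [PySem.List.len],
    PySem.List.pyRange_zero_natCast, List.map_map]
  simp only [List.foldl_map, Function.comp_apply]
  rw [pvFoldl_ite_range
      (fun j : Nat => PySem.List.pyGetD cs ((j : Nat) : Int) ' ' ≠ '*'
        ∧ (((j : Nat) : Int) = 0 ∨ PySem.List.pyGetD cs (((j : Nat) : Int) - 1) ' ' ≠ '*')
        ∧ (((j : Nat) : Int) = ((cs.length : Nat) : Int) - 1 ∨ PySem.List.pyGetD cs (((j : Nat) : Int) + 1) ' ' ≠ '*'))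
      (fun j : Nat => pvForceA.getD (PySem.List.pyGetD cs ((j : Nat) : Int) ' ') 0)]
  rw [Finset.sum_range_succ, Finset.sum_range_succ']
  have htop : pvForceA.getD (pvModel ((' ' :: cs) ++ [' ']) (cs.length + 2) (cs.length + 1)) 0 = 0 := by
    simp only [pvModel, pvPad_getD', if_neg (Nat.succ_ne_zero cs.length), Nat.add_sub_cancel,
      List.getD_eq_default cs ' ' (le_refl cs.length)]
    rw [if_neg (by decide)]
    exact pvG_if _
  have hbot : pvForceA.getD (pvModel ((' ' :: cs) ++ [' ']) (cs.length + 2) 0) 0 = 0 := by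
    simp only [pvModel, h0]
    rw [if_neg (by decide)]
    exact pvG_if _
  rw [htop, hbot]
  simp only [add_zero, zero_add]
  exact Finset.sum_congr rfl (fun j hj => pvTerm_eq cs j (Finset.mem_range.mp hj))

-- ===== VERDICT (by name: the statement is the Claim_ definition above) =====
theorem alphabet_war_spec : Claim_equal_alphabet_war := by
  intro fight _
  show alphabet_war fight = alphabet_war_alt fight
  simp only [alphabet_war, alphabet_war_alt]
  rw [pvTotal_eq fight.toList]
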